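-- pv_equiv track=rewrite | github.com/XeTK/rpi-epaper-monitor | data.py | unify_and_construct
-- ===== SOURCE A (Python) =====
-- def unify_and_construct(rows):
--     padding_size = 0
--
--     ret_rows = []
--
--     group_longest = []
--
--     longest = -1
--     for row in rows:
--         if len(row) == 0:
--             group_longest.append(longest)
--             longest = -1
--             continue
--
--         row_length = len(row[0])
--         if row_length > longest:
--             longest = row_length
--     group_longest.append(longest)
--
--     group_index = 0
--     for row in rows:
--         if len(row) == 0:
--             ret_rows.append("") # blank row
--             group_index = group_index + 1
--             continue
--
--         row_length = len(row[0])
--         diff = group_longest[group_index] - row_length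
--
--         padding = ""
--         for _ in range(diff + 1):
--             padding = padding + " "
--
--         new_row = "%s:%s%s" % (row[0], padding, row[1])
--         ret_rows.append(new_row)
--
--     return ret_rows
-- ===== SOURCE B (Python) =====
-- def unify_and_construct(rows):
--     def render(group):
--         if not group:
--             return []
--         m = max(len(r[0]) for r in group)
--         return ["%s:%s%s" % (r[0], " " * (m - len(r[0]) + 1), r[1]) for r in group]
--
--     out = []
--     group = []
--     for row in rows:
--         if row:
--             group.append(row)
--         else:
--             out.extend(render(group))
--             out.append("")
--             group = []
--     out.extend(render(group))
--     return out
-- ===== Notes on version B (the rewrite author's own statement) =====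
-- stated objective: alternative
-- what changed: Replaced A's two coupled global scans (precompute a per-group max list, then re-scan all rows indexing it with a group counter and build padding by a character-append loop) with a single pass that accumulates the current group and renders each group on its own when its terminating blank row (or the end of input) is reached.
import Mathlib
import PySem

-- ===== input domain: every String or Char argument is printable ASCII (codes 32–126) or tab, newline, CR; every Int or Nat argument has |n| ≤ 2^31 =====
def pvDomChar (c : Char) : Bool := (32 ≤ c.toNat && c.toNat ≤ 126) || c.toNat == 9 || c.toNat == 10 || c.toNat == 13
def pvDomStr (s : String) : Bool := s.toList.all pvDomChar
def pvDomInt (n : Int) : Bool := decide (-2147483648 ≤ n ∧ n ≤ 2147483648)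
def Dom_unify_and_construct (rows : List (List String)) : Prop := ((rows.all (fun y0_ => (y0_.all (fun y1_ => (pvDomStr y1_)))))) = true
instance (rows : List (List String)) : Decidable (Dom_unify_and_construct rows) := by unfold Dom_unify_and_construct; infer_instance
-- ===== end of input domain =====

-- B replaces A's two coupled global scans by a single pass that renders each group
-- when its terminating blank row (or the end) is reached; same cost, different structure.

-- ===== PORT A =====
-- Literal port of A: first scan building group_longest (max key length per group,
-- -1 initial), then a second scan rendering each row, indexing group_longest with a
-- group counter and building the padding by repeated one-space appends over range(diff+1).
def unify_and_construct (rows : List (List String)) : List String :=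
  let fst := rows.foldl (fun (st : List Int × Int) row =>
    if row.length = 0 then (st.1 ++ [st.2], -1)
    else
      let row_length : Int := (((PySem.List.pyGet? row 0).getD "").length : Int)
      (st.1, if row_length > st.2 then row_length else st.2)) ([], -1)
  let group_longest := fst.1 ++ [fst.2]
  let snd := rows.foldl (fun (st : List String × Int) row =>
    if row.length = 0 then (st.1 ++ [""], st.2 + 1)
    else
      let s0 := (PySem.List.pyGet? row 0).getD ""
      let row_length : Int := (s0.length : Int)
      let diff := ((PySem.List.pyGet? group_longest st.2).getD 0) - row_length
      let padding := (PySem.List.pyRange 0 (diff + 1) 1).foldl (fun p _ => p ++ " ") ""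
      (st.1 ++ [s0 ++ ":" ++ padding ++ (PySem.List.pyGet? row 1).getD ""], st.2)) ([], 0)
  snd.1

-- ===== PORT B =====
-- render(group): max over the group's key lengths (ported as foldl max 0 — exact
-- because Python's max is over a nonempty list of nonnegative lengths), then map.
def pvRenderGroup (group : List (List String)) : List String :=
  if group.isEmpty then []
  else
    let m := (group.map (fun r => ((PySem.List.pyGet? r 0).getD "").length)).foldl max 0
    group.map (fun r =>
      let s0 := (PySem.List.pyGet? r 0).getD ""
      s0 ++ ":" ++ String.ofList (List.replicate (m - s0.length + 1) ' ') ++ (PySem.List.pyGet? r 1).getD "")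

def unify_and_construct_alt (rows : List (List String)) : List String :=
  let st := rows.foldl (fun (st : List String × List (List String)) row =>
    if row.isEmpty then (st.1 ++ pvRenderGroup st.2 ++ [""], [])
    else (st.1, st.2 ++ [row])) ([], [])
  st.1 ++ pvRenderGroup st.2

-- ===== PRECONDITION & SPEC =====
-- Pre_ excludes rows of length exactly 1, on which both A and B raise IndexError (row[1]).
def Pre_unify_and_construct (rows : List (List String)) : Prop :=
  ∀ row ∈ rows, row = [] ∨ 2 ≤ row.length
instance (rows : List (List String)) : Decidable (Pre_unify_and_construct rows) := by
  unfold Pre_unify_and_construct; infer_instance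

def pvWitness_unify_and_construct : List (List String) := [["a", "x"], ["bbb", "y"], [], ["c", "z"]]

def Spec_unify_and_construct (rows : List (List String)) (out : List String) : Prop := out = unify_and_construct_alt rows
instance (rows : List (List String)) (out : List String) : Decidable (Spec_unify_and_construct rows out) := by unfold Spec_unify_and_construct; infer_instance

-- ===== CLAIM (what is proved, stated in full; the proofs are below) =====
def Claim_equal_unify_and_construct : Prop := ∀ (rows : List (List String)), Dom_unify_and_construct rows → Pre_unify_and_construct rows → Spec_unify_and_construct rows (unify_and_construct rows)

-- ===== LEMMAS AND PROOFS =====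

-- key length of a row (0 for an empty row, matching the ports' getD "")
def pvLen (r : List String) : Nat := ((PySem.List.pyGet? r 0).getD "").length

-- the three step functions, definitionally equal to the ports' inlined lambdas
def pvF1 : List Int × Int → List String → List Int × Int := fun st row =>
  if row.length = 0 then (st.1 ++ [st.2], -1)
  else
    let row_length : Int := (((PySem.List.pyGet? row 0).getD "").length : Int)
    (st.1, if row_length > st.2 then row_length else st.2)

def pvF2 (G : List Int) : List String × Int → List String → List String × Int := fun st row =>
  if row.length = 0 then (st.1 ++ [""], st.2 + 1)
  else
    let s0 := (PySem.List.pyGet? row 0).getD ""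
    let row_length : Int := (s0.length : Int)
    let diff := ((PySem.List.pyGet? G st.2).getD 0) - row_length
    let padding := (PySem.List.pyRange 0 (diff + 1) 1).foldl (fun p _ => p ++ " ") ""
    (st.1 ++ [s0 ++ ":" ++ padding ++ (PySem.List.pyGet? row 1).getD ""], st.2)

def pvFB : List String × List (List String) → List String → List String × List (List String) := fun st row =>
  if row.isEmpty then (st.1 ++ pvRenderGroup st.2 ++ [""], [])
  else (st.1, st.2 ++ [row])

-- recursive characterisation of A's first scan: the per-group max list
def pvGm (l : Int) : List (List String) → List Int
  | [] => [l]
  | r :: rs =>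
    if r.length = 0 then l :: pvGm (-1) rs
    else pvGm (if (pvLen r : Int) > l then (pvLen r : Int) else l) rs

-- A's rendering of one row given the group max m
def pvRenderA (m : Int) (r : List String) : String :=
  ((PySem.List.pyGet? r 0).getD "") ++ ":" ++
    (PySem.List.pyRange 0 (m - ((((PySem.List.pyGet? r 0).getD "").length : Nat) : Int) + 1) 1).foldl
      (fun p _ => p ++ " ") "" ++ (PySem.List.pyGet? r 1).getD ""

-- recursive characterisation of A's second scan, consuming the group-max list
def pvOut2 (G : List Int) : List (List String) → List String
  | [] => []
  | r :: rs =>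
    if r.length = 0 then "" :: pvOut2 G.tail rs
    else pvRenderA (G.headD 0) r :: pvOut2 G rs

-- recursive characterisation of B's scan, carrying the pending group
def pvBspec (g : List (List String)) : List (List String) → List String
  | [] => pvRenderGroup g
  | r :: rs =>
    if r.isEmpty then pvRenderGroup g ++ "" :: pvBspec [] rs
    else pvBspec (g ++ [r]) rs

theorem pvFold1 (rows : List (List String)) : ∀ (acc : List Int) (l : Int),
    (rows.foldl pvF1 (acc, l)).1 ++ [(rows.foldl pvF1 (acc, l)).2] = acc ++ pvGm l rows := by
  induction rows with
  | nil => intro acc l; simp [pvGm]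
  | cons r rs ih =>
    intro acc l
    by_cases h : r.length = 0
    · rw [List.foldl_cons]
      have hs : pvF1 (acc, l) r = (acc ++ [l], -1) := by simp [pvF1, h]
      rw [hs, ih]
      simp [pvGm, h]
    · rw [List.foldl_cons]
      have hs : pvF1 (acc, l) r = (acc, if (pvLen r : Int) > l then (pvLen r : Int) else l) := by
        simp [pvF1, h, pvLen]
      rw [hs, ih]
      simp [pvGm, h]

theorem pvFold2 (G : List Int) (rows : List (List String)) : ∀ (acc : List String) (n : Nat),
    (rows.foldl (pvF2 G) (acc, (n : Int))).1 = acc ++ pvOut2 (G.drop n) rows := by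
  induction rows with
  | nil => intro acc n; simp [pvOut2]
  | cons r rs ih =>
    intro acc n
    by_cases h : r.length = 0
    · rw [List.foldl_cons]
      have hs : pvF2 G (acc, (n : Int)) r = (acc ++ [""], ((n + 1 : Nat) : Int)) := by
        simp [pvF2, h]
      rw [hs, ih]
      simp [pvOut2, h, List.tail_drop]
    · rw [List.foldl_cons]
      have hget : (PySem.List.pyGet? G ((n : Nat) : Int)).getD 0 = (G.drop n).headD 0 := by
        simp [PySem.List.pyGet?_natCast, List.headD_eq_head?_getD, List.head?_drop]
      have hs : pvF2 G (acc, (n : Int)) r = (acc ++ [pvRenderA ((G.drop n).headD 0) r], (n : Int)) := by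
        simp [pvF2, h, pvRenderA]
      rw [hs, ih]
      simp [pvOut2, h]

theorem pvFoldB (rows : List (List String)) : ∀ (acc : List String) (g : List (List String)),
    (rows.foldl pvFB (acc, g)).1 ++ pvRenderGroup (rows.foldl pvFB (acc, g)).2 = acc ++ pvBspec g rows := by
  induction rows with
  | nil => intro acc g; simp [pvBspec]
  | cons r rs ih =>
    intro acc g
    by_cases h : r.isEmpty
    · rw [List.foldl_cons]
      have hs : pvFB (acc, g) r = (acc ++ pvRenderGroup g ++ [""], []) := by simp [pvFB, h]
      rw [hs, ih]
      simp [pvBspec, h]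
    · rw [List.foldl_cons]
      have hs : pvFB (acc, g) r = (acc, g ++ [r]) := by simp [pvFB, h]
      rw [hs, ih]
      simp [pvBspec, h]

theorem pvA_eq (rows : List (List String)) :
    unify_and_construct rows = pvOut2 (pvGm (-1) rows) rows := by
  have h1 := pvFold1 rows [] (-1)
  have h2 := pvFold2 (pvGm (-1) rows) rows [] 0
  show (rows.foldl (pvF2 ((rows.foldl pvF1 ([], -1)).1 ++ [(rows.foldl pvF1 ([], -1)).2])) ([], (0:Int))).1 = _
  rw [show ((rows.foldl pvF1 ([], -1)).1 ++ [(rows.foldl pvF1 ([], -1)).2]) = pvGm (-1) rows by simpa using h1]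
  simpa using h2

theorem pvB_eq (rows : List (List String)) :
    unify_and_construct_alt rows = pvBspec [] rows := by
  have h := pvFoldB rows [] []
  show (rows.foldl pvFB ([], [])).1 ++ pvRenderGroup (rows.foldl pvFB ([], [])).2 = _
  simpa using h

-- initial max accumulator as A's first loop maintains it over a pending group
def pvLfold (g : List (List String)) : Int :=
  g.foldl (fun l r => if (pvLen r : Int) > l then (pvLen r : Int) else l) (-1)

-- B's group max
def pvM (g : List (List String)) : Nat := (g.map pvLen).foldl max 0

theorem pvIfMax (l x : Int) : (if x > l then x else l) = max l x := by
  rw [max_def]; split_ifs <;> omega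

theorem pvLfoldMap (g : List (List String)) : ∀ a : Int,
    g.foldl (fun l r => if (pvLen r : Int) > l then (pvLen r : Int) else l) a =
      (g.map (fun r => (pvLen r : Int))).foldl max a := by
  intro a
  simp only [pvIfMax]
  rw [List.foldl_map]

theorem pvCastFold (rs : List (List String)) : ∀ a : Nat,
    ((rs.foldl (fun l r => max l (pvLen r)) a : Nat) : Int) =
      rs.foldl (fun l r => max l ((pvLen r : Nat) : Int)) (a : Int) := by
  induction rs with
  | nil => intro a; simp
  | cons n ns ih => intro a; simp [List.foldl_cons, ih, Nat.cast_max]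

theorem pvInitLe (ns : List Nat) : ∀ a : Nat, a ≤ ns.foldl max a := by
  induction ns with
  | nil => intro a; simp
  | cons n ns ih => intro a; exact le_trans (le_max_left a n) (ih _)

theorem pvMemLe (ns : List Nat) : ∀ (a x : Nat), x ∈ ns → x ≤ ns.foldl max a := by
  induction ns with
  | nil => intro a x hx; simp at hx
  | cons n ns ih =>
    intro a x hx
    rcases List.mem_cons.mp hx with h | h
    · subst h; exact le_trans (le_max_right a x) (pvInitLe ns _)
    · exact ih _ _ h

theorem pvLfold_eq (g : List (List String)) (hg : g ≠ []) : pvLfold g = (pvM g : Int) := by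
  cases g with
  | nil => exact absurd rfl hg
  | cons r rs =>
    rw [pvLfold, pvLfoldMap, pvM]
    rw [List.map_cons, List.foldl_cons, List.map_cons, List.foldl_cons]
    rw [show max (-1 : Int) (pvLen r : Int) = ((pvLen r : Int)) from max_eq_right (by omega)]
    rw [show max 0 (pvLen r) = pvLen r from max_eq_right (Nat.zero_le _)]
    simp only [List.foldl_map]
    exact (pvCastFold rs (pvLen r)).symm

theorem pvLfold_append (g : List (List String)) (r : List String) :
    pvLfold (g ++ [r]) = if (pvLen r : Int) > pvLfold g then (pvLen r : Int) else pvLfold g := by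
  simp [pvLfold, List.foldl_append]

theorem pvPadFold (L : List Int) : ∀ s : String,
    L.foldl (fun p _ => p ++ " ") s = s ++ String.ofList (List.replicate L.length ' ') := by
  induction L with
  | nil =>
    intro s
    apply String.toList_injective
    simp
  | cons x xs ih =>
    intro s
    rw [List.foldl_cons, ih]
    apply String.toList_injective
    simp [List.replicate_succ]

theorem pvRenderA_cast (M : Nat) (r : List String) (h : pvLen r ≤ M) :
    pvRenderA (M : Int) r =
      ((PySem.List.pyGet? r 0).getD "") ++ ":" ++
        String.ofList (List.replicate (M - pvLen r + 1) ' ') ++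
        (PySem.List.pyGet? r 1).getD "" := by
  unfold pvRenderA
  unfold pvLen at h ⊢
  have hk : (M : Int) - (((PySem.List.pyGet? r 0).getD "").length : Int) + 1 =
      ((M - ((PySem.List.pyGet? r 0).getD "").length + 1 : Nat) : Int) := by
    omega
  rw [hk, pvPadFold]
  have hlen : (PySem.List.pyRange 0 ((M - ((PySem.List.pyGet? r 0).getD "").length + 1 : Nat) : Int) 1).length
      = M - ((PySem.List.pyGet? r 0).getD "").length + 1 := by
    simp [PySem.List.length_pyRange_one]
  rw [hlen]
  apply String.toList_injective
  simp

theorem pvRender_eq (g : List (List String)) :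
    g.map (pvRenderA (pvLfold g)) = pvRenderGroup g := by
  by_cases hg : g = []
  · subst hg; simp [pvRenderGroup]
  · rw [pvLfold_eq g hg]
    rw [pvRenderGroup]
    rw [if_neg (by simpa [List.isEmpty_iff] using hg)]
    apply List.map_congr_left
    intro r hr
    have hle : pvLen r ≤ pvM g := pvMemLe _ _ _ (List.mem_map_of_mem hr)
    rw [pvRenderA_cast (pvM g) r hle]
    rfl

theorem pvMain (rows : List (List String)) : ∀ g : List (List String),
    g.map (pvRenderA ((pvGm (pvLfold g) rows).headD 0)) ++ pvOut2 (pvGm (pvLfold g) rows) rows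
      = pvBspec g rows := by
  induction rows with
  | nil => intro g; simp [pvGm, pvOut2, pvBspec, pvRender_eq g]
  | cons r rs ih =>
    intro g
    by_cases h : r.length = 0
    · have hE : r.isEmpty = true := by simpa [List.isEmpty_iff, List.length_eq_zero_iff] using h
      have hgm : pvGm (pvLfold g) (r :: rs) = pvLfold g :: pvGm (-1) rs := by
        rw [pvGm]; simp [h]
      rw [hgm]
      have h0 : pvOut2 (pvLfold g :: pvGm (-1) rs) (r :: rs)
          = "" :: pvOut2 (pvGm (-1) rs) rs := by
        rw [pvOut2]; simp [h]
      rw [h0, List.headD_cons, pvRender_eq g]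
      have hb : pvBspec g (r :: rs) = pvRenderGroup g ++ "" :: pvBspec [] rs := by
        rw [pvBspec]; simp [hE]
      rw [hb]
      have := ih []
      simp only [List.map_nil, List.nil_append] at this
      rw [show pvLfold [] = (-1 : Int) from rfl] at this
      rw [this]
    · have hE : r.isEmpty = false := by
        simp only [List.isEmpty_eq_false_iff, ne_eq]; intro hc; exact h (by simp [hc])
      have hgm : pvGm (pvLfold g) (r :: rs) = pvGm (pvLfold (g ++ [r])) rs := by
        rw [pvGm]; simp [h, pvLfold_append]
      rw [hgm]
      have h0 : pvOut2 (pvGm (pvLfold (g ++ [r])) rs) (r :: rs)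
          = pvRenderA ((pvGm (pvLfold (g ++ [r])) rs).headD 0) r
              :: pvOut2 (pvGm (pvLfold (g ++ [r])) rs) rs := by
        rw [pvOut2]; simp [h]
      rw [h0]
      have hb : pvBspec g (r :: rs) = pvBspec (g ++ [r]) rs := by
        rw [pvBspec]; simp [hE]
      rw [hb, ← ih (g ++ [r])]
      simp

-- ===== VERDICT (by name: the statement is the Claim_ definition above) =====
theorem unify_and_construct_spec : Claim_equal_unify_and_construct := by
  intro rows _ _
  unfold Spec_unify_and_construct
  rw [pvA_eq, pvB_eq]
  simpa using pvMain rows []
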